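-- pv_equiv track=rewrite | github.com/tommy780/DNA_designer | random_DNA_sequence_generator.py | seq_base_format
-- ===== SOURCE A (Python) =====
-- def seq_base_format(seq, code):
--     dna_base_f = ''
--     if code == 'M':  # A or C
--         for i in range(0, len(seq)):
--             if seq[i] == 'A' or seq[i] == 'C':
--                 dna_base_f += code
--             else:
--                 dna_base_f += seq[i]
--     if code == 'R':  # A or T
--         for i in range(0, len(seq)):
--             if seq[i] == 'A' or seq[i] == 'T':
--                 dna_base_f += code
--             else:
--                 dna_base_f += seq[i]
--     if code == 'W':  # A or T
--         for i in range(0, len(seq)):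
--             if seq[i] == 'A' or seq[i] == 'T':
--                 dna_base_f += code
--             else:
--                 dna_base_f += seq[i]
--     if code == 'S':  # C or G
--         for i in range(0, len(seq)):
--             if seq[i] == 'C' or seq[i] == 'G':
--                 dna_base_f += code
--             else:
--                 dna_base_f += seq[i]
--     if code == 'Y':  # C or T
--         for i in range(0, len(seq)):
--             if seq[i] == 'C' or seq[i] == 'T':
--                 dna_base_f += code
--             else:
--                 dna_base_f += seq[i]
--     if code == 'K':  # G or T
--         for i in range(0, len(seq)):
--             if seq[i] == 'G' or seq[i] == 'T':
--                 dna_base_f += code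
--             else:
--                 dna_base_f += seq[i]
--     if code == 'V':  # A or C or G
--         for i in range(0, len(seq)):
--             if seq[i] == 'A' or seq[i] == 'C' or seq[i] == 'G':
--                 dna_base_f += code
--             else:
--                 dna_base_f += seq[i]
--     if code == 'H':  # A or C or T
--         for i in range(0, len(seq)):
--             if seq[i] == 'A' or seq[i] == 'C' or seq[i] == 'T':
--                 dna_base_f += code
--             else:
--                 dna_base_f += seq[i]
--     if code == 'D':  # A or G or T
--         for i in range(0, len(seq)):
--             if seq[i] == 'A' or seq[i] == 'G' or seq[i] == 'T':
--                 dna_base_f += code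
--             else:
--                 dna_base_f += seq[i]
--     if code == 'B':  # C or G or T
--         for i in range(0, len(seq)):
--             if seq[i] == 'C' or seq[i] == 'G' or seq[i] == 'T':
--                 dna_base_f += code
--             else:
--                 dna_base_f += seq[i]
--     if code == 'N':  # A or C or G or T
--         for i in range(0, len(seq)):
--             if seq[i] == 'A' or seq[i] == 'C' or seq[i] == 'G' or seq[i] == 'T':
--                 dna_base_f += code
--             else:
--                 dna_base_f += seq[i]
--     return dna_base_f
-- ===== SOURCE B (Python) =====
-- IUPAC_SETS = {
--     'M': 'AC', 'R': 'AT', 'W': 'AT', 'S': 'CG', 'Y': 'CT', 'K': 'GT',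
--     'V': 'ACG', 'H': 'ACT', 'D': 'AGT', 'B': 'CGT', 'N': 'ACGT',
-- }
--
-- def seq_base_format(seq, code):
--     # Staged whole-string passes: one str.replace per base of the code's set.
--     # Safe because no code letter is itself one of the bases A/C/G/T.
--     if code not in IUPAC_SETS:
--         return ''
--     for base in IUPAC_SETS[code]:
--         seq = seq.replace(base, code)
--     return seq
-- ===== Notes on version B (the rewrite author's own statement) =====
-- stated objective: simpler
-- what changed: Instead of one character-by-character scan per code branch building the output incrementally, B runs staged whole-string str.replace passes, one per base in the code's set (correct because no code letter is itself a base), after a single table lookup.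
import Mathlib
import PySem

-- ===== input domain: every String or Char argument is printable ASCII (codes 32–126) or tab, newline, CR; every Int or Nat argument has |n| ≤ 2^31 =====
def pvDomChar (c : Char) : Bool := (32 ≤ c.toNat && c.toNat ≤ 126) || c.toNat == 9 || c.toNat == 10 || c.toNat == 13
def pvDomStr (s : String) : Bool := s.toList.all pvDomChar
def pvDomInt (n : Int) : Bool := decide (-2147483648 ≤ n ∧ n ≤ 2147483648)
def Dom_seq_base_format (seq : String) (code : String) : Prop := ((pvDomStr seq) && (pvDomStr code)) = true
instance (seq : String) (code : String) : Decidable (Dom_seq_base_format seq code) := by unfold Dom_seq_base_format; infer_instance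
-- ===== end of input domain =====

-- B replaces A's 11 per-code character scans by a table lookup followed by staged whole-string replace passes, one per base (objective: simpler).

-- ===== PORT A =====
-- one of A's `for i in range(len(seq))` loops: append code for a matching base, else the base itself
def aScan (p : Char → Bool) (code : List Char) : List Char → List Char → List Char
  | [], acc => acc
  | c :: rest, acc => aScan p code rest (if p c then acc ++ code else acc ++ [c])

def seq_base_format (seq : String) (code : String) : String :=
  let d : List Char := []
  let d := if code = "M" then aScan (fun c => c == 'A' || c == 'C') code.toList seq.toList d else d
  let d := if code = "R" then aScan (fun c => c == 'A' || c == 'T') code.toList seq.toList d else d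
  let d := if code = "W" then aScan (fun c => c == 'A' || c == 'T') code.toList seq.toList d else d
  let d := if code = "S" then aScan (fun c => c == 'C' || c == 'G') code.toList seq.toList d else d
  let d := if code = "Y" then aScan (fun c => c == 'C' || c == 'T') code.toList seq.toList d else d
  let d := if code = "K" then aScan (fun c => c == 'G' || c == 'T') code.toList seq.toList d else d
  let d := if code = "V" then aScan (fun c => c == 'A' || c == 'C' || c == 'G') code.toList seq.toList d else d
  let d := if code = "H" then aScan (fun c => c == 'A' || c == 'C' || c == 'T') code.toList seq.toList d else d
  let d := if code = "D" then aScan (fun c => c == 'A' || c == 'G' || c == 'T') code.toList seq.toList d else d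
  let d := if code = "B" then aScan (fun c => c == 'C' || c == 'G' || c == 'T') code.toList seq.toList d else d
  let d := if code = "N" then aScan (fun c => c == 'A' || c == 'C' || c == 'G' || c == 'T') code.toList seq.toList d else d
  String.ofList d

-- ===== PORT B =====
-- the IUPAC_SETS dict of Source B: code letter → string of the bases it replaces
def iupacSets : List (String × String) :=
  [("M", "AC"), ("R", "AT"), ("W", "AT"), ("S", "CG"), ("Y", "CT"), ("K", "GT"),
   ("V", "ACG"), ("H", "ACT"), ("D", "AGT"), ("B", "CGT"), ("N", "ACGT")]

-- `for base in IUPAC_SETS[code]: seq = seq.replace(base, code)` as a fold of Str.replace passes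
def seq_base_format_alt (seq : String) (code : String) : String :=
  match iupacSets.find? (fun p => code == p.1) with
  | none => ""
  | some (_, bases) =>
      bases.toList.foldl (fun s b => PySem.Str.replace s (String.ofList [b]) code) seq

-- ===== PRECONDITION & SPEC =====
def Spec_seq_base_format (seq : String) (code : String) (out : String) : Prop := out = seq_base_format_alt seq code
instance (seq : String) (code : String) (out : String) : Decidable (Spec_seq_base_format seq code out) := by unfold Spec_seq_base_format; infer_instance

-- ===== CLAIM (what is proved, stated in full; the proofs are below) =====
def Claim_equal_seq_base_format : Prop := ∀ (seq : String) (code : String), Dom_seq_base_format seq code → Spec_seq_base_format seq code (seq_base_format seq code)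

-- ===== LEMMAS AND PROOFS =====
theorem aScan_eq (p : Char → Bool) (code : List Char) :
    ∀ (cs acc : List Char),
      aScan p code cs acc = acc ++ (cs.map fun c => if p c then code else [c]).flatten := by
  intro cs
  induction cs with
  | nil => intro acc; simp [aScan]
  | cons c rest ih =>
      intro acc
      by_cases h : p c = true <;> simp [aScan, h, ih]

-- replace with a single-char pattern and single-char replacement is a character map
theorem go_single (o n : Char) :
    ∀ (l : List Char) (fuel : Nat) (acc : List Char), l.length ≤ fuel →
      PySem.Chars.replace.go [o] [n] fuel l acc
        = acc.reverse ++ l.map (fun c => if c = o then n else c) := by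
  intro l
  induction l with
  | nil => intro fuel acc _; cases fuel <;> simp [PySem.Chars.replace.go]
  | cons c t ih =>
      intro fuel acc hle
      cases fuel with
      | zero => simp at hle
      | succ f =>
          have hpre : [o].isPrefixOf (c :: t) = (o == c) := by
            simp [List.isPrefixOf]
          by_cases h : c = o
          · subst h
            simp only [PySem.Chars.replace.go, hpre, beq_self_eq_true, if_true]
            have hd : List.drop [c].length (c :: t) = t := rfl
            rw [hd, ih _ _ (by simpa using Nat.le_of_succ_le_succ hle)]
            simp
          · have : (o == c) = false := by simp [Ne.symm h]
            simp only [PySem.Chars.replace.go, hpre, this, if_neg Bool.false_ne_true]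
            rw [ih _ _ (by simpa using Nat.le_of_succ_le_succ hle)]
            simp [h]

theorem replace_single (o n : Char) (s : List Char) :
    PySem.Chars.replace s [o] [n] = s.map (fun c => if c = o then n else c) := by
  simp [PySem.Chars.replace, go_single o n s s.length [] le_rfl]

-- a fold of single-char replaces, none of whose targets is the code letter, is one map
theorem fold_replace (codeC : Char) :
    ∀ (bs : List Char), codeC ∉ bs → ∀ (s : List Char),
      bs.foldl (fun t b => PySem.Chars.replace t [b] [codeC]) s
        = s.map (fun c => if c ∈ bs then codeC else c) := by
  intro bs
  induction bs with
  | nil => intro _ s; simp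
  | cons b bs ih =>
      intro hmem s
      have hnb : codeC ∉ bs := fun h => hmem (List.mem_cons_of_mem _ h)
      simp only [List.foldl_cons]
      rw [ih hnb, replace_single, List.map_map]
      refine List.map_congr_left fun c _ => ?_
      by_cases hc : c = b
      · subst hc
        simp [hnb]
      · simp [Function.comp, hc]

-- lift the String-level fold of Source B's loop to the Chars level
theorem fold_str (code : String) :
    ∀ (bs : List Char) (s : String),
      (bs.foldl (fun t b => PySem.Str.replace t (String.ofList [b]) code) s).toList
        = bs.foldl (fun t b => PySem.Chars.replace t [b] code.toList) s.toList := by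
  intro bs
  induction bs with
  | nil => intro s; rfl
  | cons b bs ih =>
      intro s
      simp only [List.foldl_cons]
      rw [ih]
      simp [PySem.Str.replace]

-- one code case: A's scan equals B's staged replaces, given the pointwise agreement of the tests
theorem case_eq (codeS : String) (codeC : Char) (hcode : codeS.toList = [codeC])
    (p : Char → Bool) (bs : List Char) (hnb : codeC ∉ bs)
    (h : ∀ c, p c = true ↔ c ∈ bs) (seq : String) :
    String.ofList (aScan p codeS.toList seq.toList [])
      = bs.foldl (fun s b => PySem.Str.replace s (String.ofList [b]) codeS) seq := by
  apply String.toList_inj.mp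
  rw [fold_str, hcode, fold_replace codeC bs hnb, aScan_eq]
  simp only [String.toList_ofList, List.nil_append]
  have : ∀ c, (if p c = true then [codeC] else [c]) = [if c ∈ bs then codeC else c] := by
    intro c
    by_cases hc : c ∈ bs
    · rw [if_pos ((h c).mpr hc), if_pos hc]
    · rw [if_neg (fun hp => hc ((h c).mp hp)), if_neg hc]
  simp only [this]
  induction seq.toList with
  | nil => rfl
  | cons c cs ih => simp [ih]

-- ===== VERDICT (by name: the statement is the Claim_ definition above) =====
theorem seq_base_format_spec : Claim_equal_seq_base_format := by
  intro seq code _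
  unfold Spec_seq_base_format
  by_cases h1 : code = "M"
  · subst h1
    simp only [seq_base_format, seq_base_format_alt, iupacSets, List.find?, String.reduceEq,
      beq_self_eq_true, if_true, if_false]
    exact case_eq "M" 'M' rfl _ ['A','C'] (by decide) (by intro c; simp [or_assoc]) seq
  by_cases h2 : code = "R"
  · subst h2
    simp only [seq_base_format, seq_base_format_alt, iupacSets, List.find?, String.reduceEq,
      beq_self_eq_true, if_true, if_false]
    exact case_eq "R" 'R' rfl _ ['A','T'] (by decide) (by intro c; simp [or_assoc]) seq
  by_cases h3 : code = "W"
  · subst h3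
    simp only [seq_base_format, seq_base_format_alt, iupacSets, List.find?, String.reduceEq,
      beq_self_eq_true, if_true, if_false]
    exact case_eq "W" 'W' rfl _ ['A','T'] (by decide) (by intro c; simp [or_assoc]) seq
  by_cases h4 : code = "S"
  · subst h4
    simp only [seq_base_format, seq_base_format_alt, iupacSets, List.find?, String.reduceEq,
      beq_self_eq_true, if_true, if_false]
    exact case_eq "S" 'S' rfl _ ['C','G'] (by decide) (by intro c; simp [or_assoc]) seq
  by_cases h5 : code = "Y"
  · subst h5
    simp only [seq_base_format, seq_base_format_alt, iupacSets, List.find?, String.reduceEq,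
      beq_self_eq_true, if_true, if_false]
    exact case_eq "Y" 'Y' rfl _ ['C','T'] (by decide) (by intro c; simp [or_assoc]) seq
  by_cases h6 : code = "K"
  · subst h6
    simp only [seq_base_format, seq_base_format_alt, iupacSets, List.find?, String.reduceEq,
      beq_self_eq_true, if_true, if_false]
    exact case_eq "K" 'K' rfl _ ['G','T'] (by decide) (by intro c; simp [or_assoc]) seq
  by_cases h7 : code = "V"
  · subst h7
    simp only [seq_base_format, seq_base_format_alt, iupacSets, List.find?, String.reduceEq,
      beq_self_eq_true, if_true, if_false]
    exact case_eq "V" 'V' rfl _ ['A','C','G'] (by decide) (by intro c; simp [or_assoc]) seq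
  by_cases h8 : code = "H"
  · subst h8
    simp only [seq_base_format, seq_base_format_alt, iupacSets, List.find?, String.reduceEq,
      beq_self_eq_true, if_true, if_false]
    exact case_eq "H" 'H' rfl _ ['A','C','T'] (by decide) (by intro c; simp [or_assoc]) seq
  by_cases h9 : code = "D"
  · subst h9
    simp only [seq_base_format, seq_base_format_alt, iupacSets, List.find?, String.reduceEq,
      beq_self_eq_true, if_true, if_false]
    exact case_eq "D" 'D' rfl _ ['A','G','T'] (by decide) (by intro c; simp [or_assoc]) seq
  by_cases h10 : code = "B"
  · subst h10
    simp only [seq_base_format, seq_base_format_alt, iupacSets, List.find?, String.reduceEq,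
      beq_self_eq_true, if_true, if_false]
    exact case_eq "B" 'B' rfl _ ['C','G','T'] (by decide) (by intro c; simp [or_assoc]) seq
  by_cases h11 : code = "N"
  · subst h11
    simp only [seq_base_format, seq_base_format_alt, iupacSets, List.find?, String.reduceEq,
      beq_self_eq_true, if_true, if_false]
    exact case_eq "N" 'N' rfl _ ['A','C','G','T'] (by decide) (by intro c; simp [or_assoc]) seq
  · simp [seq_base_format, seq_base_format_alt, iupacSets,
      h1, h2, h3, h4, h5, h6, h7, h8, h9, h10, h11]
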